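-- pv_equiv track=rewrite | github.com/ariffazil/geox | contracts/tools/canonical/kernel/_ingest.py | _map_canonical_curves
-- ===== SOURCE A (Python) =====
-- CANONICAL_ALIASES = {
--     "GR":   ["GR", "GRC", "CGR", "SGR", "GAMMA"],
--     "RT":   ["RT", "ILD", "LLD", "RDEP", "RESDEEP", "AT90", "RESD", "RES_DEEP"],
--     "RHOB": ["RHOB", "DEN", "DENS", "ZDEN"],
--     "NPHI": ["NPHI", "NEUT", "TNPH", "CNCF"],
--     "DT":   ["DT", "DTC", "AC"],
--     "PEF":  ["PEF", "PE"],
--     "CALI": ["CALI", "HCAL", "CAL", "DCAL"],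
--     "SP":   ["SP"],
--     "DTS":  ["DTS", "DTSM"],
-- }
--
-- def _map_canonical_curves(raw_mnemonics: list[str]) -> tuple[dict[str, str], list[str]]:
--     """Map raw LAS mnemonics to canonical names. Returns (canonical_map, missing_canonicals)."""
--     raw_upper = {m.upper() for m in raw_mnemonics}
--     canonical_map: dict[str, str] = {}  # canonical -> raw mnemonic used
--     for canon, aliases in CANONICAL_ALIASES.items():
--         for alias in aliases:
--             if alias in raw_upper:
--                 canonical_map[canon] = alias
--                 break
--     missing = [c for c in CANONICAL_ALIASES if c not in canonical_map]
--     return canonical_map, missing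
-- ===== SOURCE B (Python) =====
-- CANONICAL_ALIASES = {
--     "GR":   ["GR", "GRC", "CGR", "SGR", "GAMMA"],
--     "RT":   ["RT", "ILD", "LLD", "RDEP", "RESDEEP", "AT90", "RESD", "RES_DEEP"],
--     "RHOB": ["RHOB", "DEN", "DENS", "ZDEN"],
--     "NPHI": ["NPHI", "NEUT", "TNPH", "CNCF"],
--     "DT":   ["DT", "DTC", "AC"],
--     "PEF":  ["PEF", "PE"],
--     "CALI": ["CALI", "HCAL", "CAL", "DCAL"],
--     "SP":   ["SP"],
--     "DTS":  ["DTS", "DTSM"],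
-- }
--
-- # Inverted index: uppercase alias -> (canonical name, priority = position in its alias list).
-- _ALIAS_INDEX = {
--     alias: (canon, j)
--     for canon, aliases in CANONICAL_ALIASES.items()
--     for j, alias in enumerate(aliases)
-- }
--
--
-- def _map_canonical_curves(raw_mnemonics: list[str]) -> tuple[dict[str, str], list[str]]:
--     """Map raw LAS mnemonics to canonical names. Returns (canonical_map, missing_canonicals)."""
--     best: dict[str, tuple[int, str]] = {}  # canon -> (priority, raw mnemonic uppercased)
--     for m in raw_mnemonics:
--         u = m.upper()
--         hit = _ALIAS_INDEX.get(u)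
--         if hit is None:
--             continue
--         canon, j = hit
--         cur = best.get(canon)
--         if cur is None or j < cur[0]:
--             best[canon] = (j, u)
--     canonical_map = {c: best[c][1] for c in CANONICAL_ALIASES if c in best}
--     missing = [c for c in CANONICAL_ALIASES if c not in best]
--     return canonical_map, missing
-- ===== Notes on version B (the rewrite author's own statement) =====
-- stated objective: alternative
-- what changed: Replaces the nested 'for each canonical, scan its alias list against the uppercased set' loops with a prebuilt inverted index (alias -> (canonical, priority)) and a single pass over the raw mnemonics that keeps the best (lowest-priority-index) hit per canonical.
import Mathlib
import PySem

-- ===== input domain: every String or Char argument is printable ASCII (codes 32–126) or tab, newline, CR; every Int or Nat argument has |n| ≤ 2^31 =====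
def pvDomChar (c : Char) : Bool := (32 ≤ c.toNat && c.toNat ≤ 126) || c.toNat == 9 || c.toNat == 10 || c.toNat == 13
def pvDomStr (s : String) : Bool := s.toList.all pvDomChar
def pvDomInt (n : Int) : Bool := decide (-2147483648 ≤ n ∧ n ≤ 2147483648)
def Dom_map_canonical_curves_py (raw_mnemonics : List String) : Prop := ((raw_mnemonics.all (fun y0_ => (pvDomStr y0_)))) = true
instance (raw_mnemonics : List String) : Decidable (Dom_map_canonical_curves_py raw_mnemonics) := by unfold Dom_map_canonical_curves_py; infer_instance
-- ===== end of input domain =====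

-- B replaces A's nested canonical-by-canonical alias scan with a prebuilt inverted alias index and
-- one best-priority-tracking pass over the raw mnemonics ('alternative'; same cost, different structure).

-- ===== PORT A =====
-- the module-level constant CANONICAL_ALIASES (a dict, ported as its association list)
def canonicalAliases : List (String × List String) :=
  [("GR",   ["GR", "GRC", "CGR", "SGR", "GAMMA"]),
   ("RT",   ["RT", "ILD", "LLD", "RDEP", "RESDEEP", "AT90", "RESD", "RES_DEEP"]),
   ("RHOB", ["RHOB", "DEN", "DENS", "ZDEN"]),
   ("NPHI", ["NPHI", "NEUT", "TNPH", "CNCF"]),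
   ("DT",   ["DT", "DTC", "AC"]),
   ("PEF",  ["PEF", "PE"]),
   ("CALI", ["CALI", "HCAL", "CAL", "DCAL"]),
   ("SP",   ["SP"]),
   ("DTS",  ["DTS", "DTSM"])]

-- A's inner loop: 'for alias in aliases: if alias in raw_upper: canonical_map[canon] = alias; break'
def pvScanAliases (raw_upper : PySem.Set String) (canon : String)
    (d : PySem.Dict String String) : List String → PySem.Dict String String
  | [] => d
  | a :: rest =>
    if PySem.Set.contains raw_upper a then d.insert canon a
    else pvScanAliases raw_upper canon d rest

def map_canonical_curves_py (raw_mnemonics : List String) : (List (String × String)) × List String :=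
  let raw_upper : PySem.Set String := PySem.Set.ofList (raw_mnemonics.map PySem.Str.upper)
  let canonical_map : PySem.Dict String String :=
    canonicalAliases.foldl (fun d ca => pvScanAliases raw_upper ca.1 d ca.2) PySem.Dict.empty
  let missing : List String :=
    (canonicalAliases.map Prod.fst).filter (fun c => !(canonical_map.contains c))
  (canonical_map.items, missing)

-- ===== PORT B =====
-- the module-level inverted index _ALIAS_INDEX = {alias: (canon, j) for canon, aliases in … for j, alias in enumerate(aliases)}
def pvAliasIndex : PySem.Dict String (String × Int) :=
  canonicalAliases.foldl
    (fun d ca => (PySem.List.enumerate ca.2).foldl (fun d ja => d.insert ja.2 (ca.1, ja.1)) d)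
    PySem.Dict.empty

-- the body of B's single pass ('for m in raw_mnemonics: …')
def pvBStep (best : PySem.Dict String (Int × String)) (m : String) :
    PySem.Dict String (Int × String) :=
  let u := PySem.Str.upper m
  match pvAliasIndex.get? u with
  | none => best
  | some cj =>
    match best.get? cj.1 with
    | none => best.insert cj.1 (cj.2, u)
    | some cur => if cj.2 < cur.1 then best.insert cj.1 (cj.2, u) else best

def map_canonical_curves_py_alt (raw_mnemonics : List String) : (List (String × String)) × List String :=
  let best : PySem.Dict String (Int × String) := raw_mnemonics.foldl pvBStep PySem.Dict.empty
  let canonical_map : List (String × String) :=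
    canonicalAliases.filterMap (fun ca => (best.get? ca.1).map (fun p => (ca.1, p.2)))
  let missing : List String :=
    (canonicalAliases.map Prod.fst).filter (fun c => !(best.contains c))
  (canonical_map, missing)

-- ===== PRECONDITION & SPEC =====
def Spec_map_canonical_curves_py (raw_mnemonics : List String) (out : (List (String × String)) × List String) : Prop := out = map_canonical_curves_py_alt raw_mnemonics
instance (raw_mnemonics : List String) (out : (List (String × String)) × List String) : Decidable (Spec_map_canonical_curves_py raw_mnemonics out) := by unfold Spec_map_canonical_curves_py; infer_instance

-- ===== CLAIM (what is proved, stated in full; the proofs are below) =====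
def Claim_equal_map_canonical_curves_py : Prop := ∀ (raw_mnemonics : List String), Dom_map_canonical_curves_py raw_mnemonics → Spec_map_canonical_curves_py raw_mnemonics (map_canonical_curves_py raw_mnemonics)

-- ===== LEMMAS AND PROOFS =====

-- the literal entries of pvAliasIndex
def pvE : List (String × String × Int) :=
  [("GR",("GR",0)),("GRC",("GR",1)),("CGR",("GR",2)),("SGR",("GR",3)),("GAMMA",("GR",4)),
   ("RT",("RT",0)),("ILD",("RT",1)),("LLD",("RT",2)),("RDEP",("RT",3)),("RESDEEP",("RT",4)),
   ("AT90",("RT",5)),("RESD",("RT",6)),("RES_DEEP",("RT",7)),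
   ("RHOB",("RHOB",0)),("DEN",("RHOB",1)),("DENS",("RHOB",2)),("ZDEN",("RHOB",3)),
   ("NPHI",("NPHI",0)),("NEUT",("NPHI",1)),("TNPH",("NPHI",2)),("CNCF",("NPHI",3)),
   ("DT",("DT",0)),("DTC",("DT",1)),("AC",("DT",2)),
   ("PEF",("PEF",0)),("PE",("PEF",1)),
   ("CALI",("CALI",0)),("HCAL",("CALI",1)),("CAL",("CALI",2)),("DCAL",("CALI",3)),
   ("SP",("SP",0)),
   ("DTS",("DTS",0)),("DTSM",("DTS",1))]

lemma pvItems_pvAliasIndex : pvAliasIndex.items = pvE := by decide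

-- the per-canon projection of B's accumulator update
def pvG (c : String) (acc : Option (Int × String)) (u : String) : Option (Int × String) :=
  match pvAliasIndex.get? u with
  | none => acc
  | some cj =>
    if cj.1 = c then
      match acc with
      | none => some (cj.2, u)
      | some cur => if cj.2 < cur.1 then some (cj.2, u) else acc
    else acc

lemma pvSet_contains_ofList (U : List String) (a : String) :
    PySem.Set.contains (PySem.Set.ofList U) a = U.contains a := by
  simp [pysem]

-- decidable global facts about the alias table
lemma pvKF : ∀ p ∈ pvE, ∀ q ∈ canonicalAliases,
    (q.1 = p.2.1 → p.1 ∈ q.2 ∧ ((q.2.idxOf p.1 : Nat) : Int) = p.2.2) ∧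
    (q.1 ≠ p.2.1 → p.1 ∉ q.2) := by decide

lemma pvKF2 : ∀ q ∈ canonicalAliases, ∀ a ∈ q.2, a ∈ pvE.map Prod.fst := by decide

lemma pvNodupAliases : ∀ q ∈ canonicalAliases, q.2.Nodup := by decide

lemma pvNodupCanons : (canonicalAliases.map Prod.fst).Nodup := by decide

lemma pvIndex_get?_some {u : String} {cj : String × Int}
    (h : pvAliasIndex.get? u = some cj) : (u, cj) ∈ pvE := by
  unfold PySem.Dict.get? at h
  rcases Option.map_eq_some_iff.mp h with ⟨pr, hfind, hsnd⟩
  have hmem := List.mem_of_find?_eq_some hfind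
  have hp : pr.1 = u := by simpa using List.find?_some hfind
  obtain ⟨p1, p2⟩ := pr
  simp only at hp hsnd
  subst hp; subst hsnd
  rw [pvItems_pvAliasIndex] at hmem
  exact hmem

lemma pvIndex_get?_none {u : String} (h : pvAliasIndex.get? u = none)
    {c : String} {as : List String} (hca : (c, as) ∈ canonicalAliases) : u ∉ as := by
  unfold PySem.Dict.get? at h
  rw [Option.map_eq_none_iff, pvItems_pvAliasIndex, List.find?_eq_none] at h
  intro hu
  have hkey : u ∈ pvE.map Prod.fst := pvKF2 (c, as) hca u hu
  rcases List.mem_map.mp hkey with ⟨p, hp, hp1⟩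
  exact h p hp (by simp [hp1])

-- find? over membership in U ++ [u]
lemma pvF1 (as U : List String) (u : String) (hu : u ∉ as) :
    as.find? (fun a => (U ++ [u]).contains a) = as.find? (fun a => U.contains a) := by
  induction as with
  | nil => rfl
  | cons x rest ih =>
    have hxu : x ≠ u := fun e => hu (e ▸ List.mem_cons_self)
    have hur : u ∉ rest := fun hr => hu (List.mem_cons_of_mem _ hr)
    have hcx : (U ++ [u]).contains x = U.contains x := by
      rw [Bool.eq_iff_iff, List.contains_iff_mem, List.contains_iff_mem]
      simp [hxu]
    cases hUx : U.contains x with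
    | true =>
      rw [List.find?_cons_of_pos (by rw [hcx]; exact hUx), List.find?_cons_of_pos hUx]
    | false =>
      have hxU : x ∉ U := by simpa using hUx
      rw [List.find?_cons_of_neg (by simp [hxU, hxu]), List.find?_cons_of_neg (by simp [hxU])]
      exact ih hur

lemma pvF2 (as : List String) (hnd : as.Nodup) (u : String) (U : List String) (hu : u ∈ as) :
    as.find? (fun a => (U ++ [u]).contains a) =
      some (match as.find? (fun a => U.contains a) with
            | none => u
            | some a => if as.idxOf u < as.idxOf a then u else a) := by
  induction as with
  | nil => cases hu
  | cons x rest ih =>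
    rcases List.nodup_cons.mp hnd with ⟨hxnr, hndr⟩
    by_cases hxu : x = u
    · subst hxu
      have hpx : (U ++ [x]).contains x = true := by
        rw [List.contains_iff_mem]; exact List.mem_append_right _ List.mem_cons_self
      rw [List.find?_cons_of_pos hpx]
      cases hU : List.find? (fun a => U.contains a) (x :: rest) with
      | none => simp
      | some a =>
        by_cases hax : a = x
        · subst hax; simp
        · have har : a ∈ rest := by
            rcases List.mem_cons.mp (List.mem_of_find?_eq_some hU) with h | h
            · exact absurd h hax
            · exact h
          have hax' : x ≠ a := fun e => hax e.symm
          simp [List.idxOf_cons_self, List.idxOf_cons_ne rest hax']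
    · have hur : u ∈ rest := by
        rcases List.mem_cons.mp hu with h | h
        · exact absurd h.symm hxu
        · exact h
      have hxu' : x ≠ u := hxu
      have hcx : (U ++ [u]).contains x = U.contains x := by
        rw [Bool.eq_iff_iff, List.contains_iff_mem, List.contains_iff_mem]
        simp [hxu]
      cases hUx : U.contains x with
      | true =>
        rw [List.find?_cons_of_pos (by rw [hcx]; exact hUx), List.find?_cons_of_pos hUx]
        simp [List.idxOf_cons_self, List.idxOf_cons_ne rest hxu']
      | false =>
        have hxU : x ∉ U := by simpa using hUx
        rw [List.find?_cons_of_neg (by simp [hxU, hxu]), List.find?_cons_of_neg (by simp [hxU])]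
        rw [ih hndr hur]
        cases hf : List.find? (fun a => U.contains a) rest with
        | none => simp
        | some a =>
          have har : a ∈ rest := List.mem_of_find?_eq_some hf
          have hxa : x ≠ a := fun e => hxnr (e ▸ har)
          simp [List.idxOf_cons_ne rest hxu', List.idxOf_cons_ne rest hxa]

-- one step of B's pass, seen through get? at a fixed canon
set_option maxRecDepth 16384 in
lemma pvStep_get? (best : PySem.Dict String (Int × String)) (m c : String) :
    (pvBStep best m).get? c = pvG c (best.get? c) (PySem.Str.upper m) := by
  unfold pvBStep pvG
  cases h : pvAliasIndex.get? (PySem.Str.upper m) with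
  | none => simp [h]
  | some cj =>
    by_cases hc : cj.1 = c
    · subst hc
      cases hb : best.get? cj.1 with
      | none => simp [h, hb, PySem.Dict.get?_insert_self]
      | some cur =>
        by_cases hlt : cj.2 < cur.1
        · simp [h, hb, hlt, PySem.Dict.get?_insert_self]
        · simp [h, hb, hlt]
    · have hcc : c ≠ cj.1 := fun e => hc e.symm
      cases hb : best.get? cj.1 with
      | none => simp [h, hb, hc, PySem.Dict.get?_insert_of_ne _ _ hcc]
      | some cur =>
        by_cases hlt : cj.2 < cur.1
        · simp [h, hb, hc, hlt, PySem.Dict.get?_insert_of_ne _ _ hcc]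
        · simp [h, hb, hc, hlt]

-- B's fold, projected to one canon key
lemma pvB1 (L : List String) (best : PySem.Dict String (Int × String)) (c : String) :
    (L.foldl pvBStep best).get? c
      = L.foldl (fun acc m => pvG c acc (PySem.Str.upper m)) (best.get? c) := by
  induction L generalizing best with
  | nil => rfl
  | cons m L ih => rw [List.foldl_cons, List.foldl_cons, ih, pvStep_get?]

-- the bridge: the projected fold picks the first alias (by list priority) present in U
set_option maxRecDepth 16384 in
lemma pvBR (U : List String) (c : String) (as : List String)
    (hca : (c, as) ∈ canonicalAliases) :
    U.foldl (pvG c) none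
      = (as.find? (fun a => U.contains a)).map (fun a => ((as.idxOf a : Int), a)) := by
  induction U using List.reverseRecOn with
  | nil => simp
  | append_singleton U u ih =>
    rw [List.foldl_append, List.foldl_cons, List.foldl_nil, ih]
    unfold pvG
    cases h : pvAliasIndex.get? u with
    | none =>
      rw [pvF1 as U u (pvIndex_get?_none h hca)]
    | some cj =>
      have hkf := pvKF _ (pvIndex_get?_some h) _ hca
      by_cases hc : c = cj.1
      · obtain ⟨hu, hj⟩ := hkf.1 hc
        dsimp only at hu hj
        rw [pvF2 as (pvNodupAliases _ hca) u U hu]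
        dsimp only
        rw [if_pos hc.symm]
        cases hf : as.find? (fun a => U.contains a) with
        | none => simp [← hj]
        | some a =>
          by_cases hlt : List.idxOf u as < List.idxOf a as
          · simp [← hj, hlt, Nat.cast_lt]
          · simp [← hj, hlt, Nat.cast_lt]
      · rw [pvF1 as U u (hkf.2 hc)]
        dsimp only
        rw [if_neg (Ne.symm hc)]

-- A's inner loop is a find?
lemma pvScan_eq (S : PySem.Set String) (c : String) (d : PySem.Dict String String)
    (as : List String) :
    pvScanAliases S c d as =
      match as.find? (fun a => PySem.Set.contains S a) with
      | none => d
      | some a => d.insert c a := by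
  induction as with
  | nil => rfl
  | cons x rest ih =>
    unfold pvScanAliases
    cases hx : PySem.Set.contains S x with
    | true => rw [List.find?_cons_of_pos hx]; simp
    | false =>
      have hxS : x ∉ S := by simpa using hx
      rw [List.find?_cons_of_neg (by simp [hxS])]; simp [ih]

-- inserting a fresh key appends to the items list
lemma pvItems_insert_fresh {d : PySem.Dict String String} {k : String} {v : String}
    (h : d.contains k = false) : (d.insert k v).items = d.items ++ [(k, v)] := by
  have := PySem.Dict.items_foldl_insert_fresh [()] (fun _ => k) (fun _ => v) d
    (by intro a _; exact h) (by simp)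
  simpa using this

lemma pvA_items (S : PySem.Set String) :
    ∀ (cs : List (String × List String)) (d : PySem.Dict String String),
      (cs.map Prod.fst).Nodup → (∀ p ∈ cs, d.contains p.1 = false) →
      (cs.foldl (fun d ca => pvScanAliases S ca.1 d ca.2) d).items
        = d.items ++ cs.filterMap
            (fun ca => (ca.2.find? (fun a => PySem.Set.contains S a)).map (fun a => (ca.1, a))) := by
  intro cs
  induction cs with
  | nil => intro d _ _; simp
  | cons ca rest ih =>
    intro d hnd hfresh
    rw [List.map_cons] at hnd
    rcases List.nodup_cons.mp hnd with ⟨hnotin, hndr⟩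
    rw [List.foldl_cons, pvScan_eq]
    cases hf : ca.2.find? (fun a => PySem.Set.contains S a) with
    | none =>
      rw [ih d hndr (fun p hp => hfresh p (List.mem_cons_of_mem _ hp)), List.filterMap_cons, hf]
      rfl
    | some a =>
      have hfca : d.contains ca.1 = false := hfresh ca List.mem_cons_self
      have hfresh' : ∀ p ∈ rest, (d.insert ca.1 a).contains p.1 = false := by
        intro p hp
        rw [PySem.Dict.contains_insert]
        have hne : p.1 ≠ ca.1 := fun e => hnotin (e ▸ List.mem_map_of_mem hp)
        simp [hne, hfresh p (List.mem_cons_of_mem _ hp)]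
      rw [ih _ hndr hfresh', pvItems_insert_fresh hfca, List.filterMap_cons, hf]
      simp

lemma pvA_untouched (S : PySem.Set String) :
    ∀ (cs : List (String × List String)) (d : PySem.Dict String String) (c : String),
      (∀ p ∈ cs, p.1 ≠ c) →
      (cs.foldl (fun d ca => pvScanAliases S ca.1 d ca.2) d).get? c = d.get? c := by
  intro cs
  induction cs with
  | nil => intro d c _; rfl
  | cons ca rest ih =>
    intro d c h
    rw [List.foldl_cons, pvScan_eq]
    have hne : c ≠ ca.1 := fun e => h ca List.mem_cons_self e.symm
    cases hf : ca.2.find? (fun a => PySem.Set.contains S a) with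
    | none => exact ih d c (fun p hp => h p (List.mem_cons_of_mem _ hp))
    | some a =>
      rw [ih _ c (fun p hp => h p (List.mem_cons_of_mem _ hp)),
        PySem.Dict.get?_insert_of_ne _ _ hne]

lemma pvA_get? (S : PySem.Set String) :
    ∀ (cs : List (String × List String)) (d : PySem.Dict String String),
      (cs.map Prod.fst).Nodup →
      ∀ c as, (c, as) ∈ cs → d.get? c = none →
      (cs.foldl (fun d ca => pvScanAliases S ca.1 d ca.2) d).get? c
        = as.find? (fun a => PySem.Set.contains S a) := by
  intro cs
  induction cs with
  | nil => intro d _ c as hmem _; cases hmem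
  | cons ca rest ih =>
    intro d hnd c as hmem hdc
    rw [List.map_cons] at hnd
    rcases List.nodup_cons.mp hnd with ⟨hnotin, hndr⟩
    rw [List.foldl_cons, pvScan_eq]
    rcases List.mem_cons.mp hmem with heq | hrest
    · subst heq
      dsimp only at hnotin ⊢
      have huntouched : ∀ p ∈ rest, p.1 ≠ c := by
        intro p hp e
        exact hnotin (e ▸ List.mem_map_of_mem hp)
      cases hf : as.find? (fun a => PySem.Set.contains S a) with
      | none => rw [pvA_untouched S rest d c huntouched, hdc]
      | some a => rw [pvA_untouched S rest _ c huntouched, PySem.Dict.get?_insert_self]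
    · have hc : c ∈ rest.map Prod.fst := by
        have := List.mem_map_of_mem (f := Prod.fst) hrest
        simpa using this
      have hne : c ≠ ca.1 := fun e => hnotin (e ▸ hc)
      cases hf : ca.2.find? (fun a => PySem.Set.contains S a) with
      | none => exact ih d hndr c as hrest hdc
      | some a =>
        exact ih _ hndr c as hrest (by rw [PySem.Dict.get?_insert_of_ne _ _ hne, hdc])

lemma pvContains_eq_isSome {κ ν : Type} [BEq κ] (d : PySem.Dict κ ν) (k : κ) :
    d.contains k = (d.get? k).isSome := by
  simp only [PySem.Dict.contains, PySem.Dict.get?, Option.isSome_map]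
  rw [Bool.eq_iff_iff, List.any_eq_true, List.find?_isSome]

-- ===== VERDICT (by name: the statement is the Claim_ definition above) =====
theorem map_canonical_curves_py_spec : Claim_equal_map_canonical_curves_py := by
  intro raw _
  unfold Spec_map_canonical_curves_py
  unfold map_canonical_curves_py map_canonical_curves_py_alt
  simp only [Prod.mk.injEq]
  have hBget : ∀ c as, (c, as) ∈ canonicalAliases →
      (raw.foldl pvBStep PySem.Dict.empty).get? c
        = (as.find? (fun a => (raw.map PySem.Str.upper).contains a)).map
            (fun a => ((as.idxOf a : Int), a)) := by
    intro c as hca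
    rw [pvB1, show (PySem.Dict.empty : PySem.Dict String (Int × String)).get? c = none from rfl,
      ← List.foldl_map, pvBR (raw.map PySem.Str.upper) c as hca]
  have hempty : ∀ p ∈ canonicalAliases,
      (PySem.Dict.empty : PySem.Dict String String).contains p.1 = false := by
    intro p _; rfl
  constructor
  · rw [pvA_items (PySem.Set.ofList (raw.map PySem.Str.upper)) canonicalAliases
      PySem.Dict.empty pvNodupCanons hempty]
    rw [show (PySem.Dict.empty : PySem.Dict String String).items = [] from rfl, List.nil_append]
    apply List.filterMap_congr
    intro ca hca
    rw [hBget ca.1 ca.2 (by rw [Prod.mk.eta]; exact hca), Option.map_map]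
    simp only [pvSet_contains_ofList]
    rfl
  · apply List.filter_congr
    intro c hc
    rcases List.mem_map.mp hc with ⟨ca, hca, rfl⟩
    rw [pvContains_eq_isSome, pvContains_eq_isSome,
      pvA_get? (PySem.Set.ofList (raw.map PySem.Str.upper)) canonicalAliases
        PySem.Dict.empty pvNodupCanons ca.1 ca.2 (by rw [Prod.mk.eta]; exact hca) rfl,
      hBget ca.1 ca.2 (by rw [Prod.mk.eta]; exact hca)]
    simp only [pvSet_contains_ofList, Option.isSome_map]
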